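-- pv_equiv track=rewrite | github.com/shaunnorris/aoc2024 | day14.py | count_blobs
-- ===== SOURCE A (Python) =====
-- def count_blobs(pos):
--     # Create a set of coordinates for efficient lookups
--     coordinates = pos.keys()
--     coords_set = set(coordinates)
--
--     # Initialize count of contiguous regions
--     count = 0
--
--     # Initialize size of largest region
--     largest_region_size = 0
--
--     # Iterate over all coordinates
--     for x, y in coordinates:
--         # If this coordinate is not yet visited (i.e., not in a region)
--         if (x, y) in coords_set:
--             # Perform flood fill from this coordinate and get the size of the region
--             region_size = flood_fill(coords_set, x, y)
--             # Update the size of the largest region if necessary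
--             largest_region_size = max(largest_region_size, region_size)
--             # Increment count of contiguous regions
--             count += 1
--
--     return count, largest_region_size
--
-- def flood_fill(coords_set, x, y):
--     # Directions to explore (up, down, left, right)
--     directions = [(0, 1), (0, -1), (1, 0), (-1, 0)]
--
--     # Create a stack for DFS
--     stack = [(x, y)]
--
--     # Initialize size of the region
--     region_size = 0
--
--     while stack:
--         x, y = stack.pop()
--         # If this coordinate is still in the set (i.e., not yet visited)
--         if (x, y) in coords_set:
--             # Mark it as visited by removing it from the set
--             coords_set.remove((x, y))
--             # Increment the size of the region
--             region_size += 1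
--             # Explore neighbors
--             for dx, dy in directions:
--                 nx, ny = x + dx, y + dy
--                 # If neighbor is in the set (i.e., contiguous)
--                 if (nx, ny) in coords_set:
--                     # Add it to the stack for further exploration
--                     stack.append((nx, ny))
--
--     return region_size
-- ===== SOURCE B (Python) =====
-- def count_blobs(pos):
--     # Extract one whole connected region at a time by frontier saturation
--     # (set algebra on whole layers), instead of a per-cell DFS stack.
--     alive = set(pos)            # cells not yet assigned to a region
--     count = 0
--     largest = 0
--     for cell in pos:            # keys in insertion order
--         if cell in alive:
--             alive.discard(cell)
--             region = {cell}
--             frontier = {cell}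
--             while frontier:
--                 frontier = {(x + dx, y + dy)
--                             for (x, y) in frontier
--                             for (dx, dy) in ((0, 1), (0, -1), (1, 0), (-1, 0))}
--                 frontier &= alive
--                 region |= frontier
--                 alive -= frontier
--             count += 1
--             largest = max(largest, len(region))
--     return count, largest
-- ===== Notes on version B (the rewrite author's own statement) =====
-- stated objective: alternative
-- what changed: A flood-fills with a per-cell DFS stack (pop one cell, mark it visited, push its neighbours); B extracts one whole connected region at a time by frontier saturation, repeatedly replacing the frontier by the set of still-unassigned neighbours of the entire frontier using set algebra (intersection/union/difference), with no stack and no per-cell pops.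
import Mathlib
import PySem

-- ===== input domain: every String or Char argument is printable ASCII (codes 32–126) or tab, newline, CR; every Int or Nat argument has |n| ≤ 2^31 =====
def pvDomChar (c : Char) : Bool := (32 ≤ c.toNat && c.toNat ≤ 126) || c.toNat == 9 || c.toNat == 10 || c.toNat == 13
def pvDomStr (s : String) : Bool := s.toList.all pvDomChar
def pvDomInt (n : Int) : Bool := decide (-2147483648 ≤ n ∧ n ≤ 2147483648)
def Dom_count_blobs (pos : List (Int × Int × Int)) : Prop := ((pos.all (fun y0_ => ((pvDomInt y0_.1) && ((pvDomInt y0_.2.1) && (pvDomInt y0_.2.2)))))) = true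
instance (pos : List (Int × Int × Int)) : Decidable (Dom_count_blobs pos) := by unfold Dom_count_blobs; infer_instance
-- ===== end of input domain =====

-- B replaces A's per-cell DFS stack flood fill by whole-component extraction via
-- frontier saturation (set algebra on whole layers); same results, alternative algorithm.
-- A only mutates a local copy of the key set; neither implementation mutates `pos`.

-- small helper cited by both ports' termination proofs
theorem pvLenLt {α : Type} {s l : List α} {x : α} (h : s.Sublist l) (hx : x ∈ l)
    (hxs : x ∉ s) : s.length < l.length := by
  rcases Nat.lt_or_ge s.length l.length with h' | h'
  · exact h'
  · have : s = l := h.eq_of_length (Nat.le_antisymm h.length_le h')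
    exact absurd (this ▸ hx) hxs

-- ===== PORT A =====
-- directions to explore (up, down, left, right)
def pvDirections : List (Int × Int) := [(0, 1), (0, -1), (1, 0), (-1, 0)]

-- Python's flood_fill mutates coords_set in place; the port returns the shrunken set
-- together with the region size.  The stack is modelled with its top at the HEAD
-- (Python pushes/pops at the list's end); only the traversal order differs.
def flood_fill_loop (S : PySem.Set (Int × Int)) (stack : List (Int × Int)) (size : Int) :
    PySem.Set (Int × Int) × Int :=
  match stack with
  | [] => (S, size)
  | p :: rest =>
    if hp : p ∈ S then
      let S' := PySem.Set.discard S p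
      let pushed := (pvDirections.map (fun d => (p.1 + d.1, p.2 + d.2))).filter
        (fun q => decide (q ∈ S'))
      flood_fill_loop S' (pushed ++ rest) (size + 1)
    else
      flood_fill_loop S rest size
termination_by (S.length, stack.length)
decreasing_by
  · apply Prod.Lex.left
    exact pvLenLt List.filter_sublist hp (by simp [PySem.Set.discard])
  · apply Prod.Lex.right
    simp

def count_blobs (pos : List (Int × Int × Int)) : Int × Int :=
  let coordinates : List (Int × Int) := PySem.List.dedup (pos.map (fun kv => (kv.1, kv.2.1)))
  let st := coordinates.foldl
    (fun (st : Int × Int × PySem.Set (Int × Int)) p =>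
      if p ∈ st.2.2 then
        let r := flood_fill_loop st.2.2 [p] 0
        (st.1 + 1, max st.2.1 r.2, r.1)
      else st)
    (0, 0, PySem.Set.ofList coordinates)
  (st.1, st.2.1)

-- ===== PORT B =====
-- the next frontier: all 4-neighbours of the current frontier that are still alive
def pvFrontierNext (frontier alive : PySem.Set (Int × Int)) : PySem.Set (Int × Int) :=
  PySem.Set.inter
    (PySem.Set.ofList (frontier.flatMap
      (fun q => pvDirections.map (fun d => (q.1 + d.1, q.2 + d.2))))) alive

-- grow one whole region by repeated frontier expansion; returns (alive, region)
def grow_loop (alive region frontier : PySem.Set (Int × Int)) :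
    PySem.Set (Int × Int) × PySem.Set (Int × Int) :=
  if h : frontier = [] then (alive, region)
  else
    let f' := pvFrontierNext frontier alive
    grow_loop (PySem.Set.diff alive f') (PySem.Set.union region f') f'
termination_by (alive.length, frontier.length)
decreasing_by
  by_cases hf : pvFrontierNext frontier alive = []
  · rw [hf]
    have : PySem.Set.diff alive [] = alive := by simp [PySem.Set.diff]
    rw [this]
    apply Prod.Lex.right
    simpa [List.length_pos_iff] using h
  · obtain ⟨x, hx⟩ := List.exists_mem_of_ne_nil _ hf
    have hxa : x ∈ alive := by
      have := List.of_mem_filter (p := fun y => alive.contains y) hx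
      simpa using this
    have hxd : x ∉ PySem.Set.diff alive (pvFrontierNext frontier alive) := by
      simp [PySem.Set.diff, List.mem_filter]
      intro _; simpa using hx
    exact Prod.Lex.left _ _ (pvLenLt List.filter_sublist hxa hxd)

def count_blobs_alt (pos : List (Int × Int × Int)) : Int × Int :=
  let keys : List (Int × Int) := PySem.List.dedup (pos.map (fun kv => (kv.1, kv.2.1)))
  let st := keys.foldl
    (fun (st : Int × Int × PySem.Set (Int × Int)) cell =>
      if cell ∈ st.2.2 then
        let r := grow_loop (PySem.Set.discard st.2.2 cell) [cell] [cell]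
        (st.1 + 1, max st.2.1 (PySem.Set.len r.2), r.1)
      else st)
    (0, 0, PySem.Set.ofList keys)
  (st.1, st.2.1)

-- ===== PRECONDITION & SPEC =====
def Spec_count_blobs (pos : List (Int × Int × Int)) (out : Int × Int) : Prop := out = count_blobs_alt pos
instance (pos : List (Int × Int × Int)) (out : Int × Int) : Decidable (Spec_count_blobs pos out) := by unfold Spec_count_blobs; infer_instance

-- ===== CLAIM (what is proved, stated in full; the proofs are below) =====
def Claim_equal_count_blobs : Prop := ∀ (pos : List (Int × Int × Int)), Dom_count_blobs pos → Spec_count_blobs pos (count_blobs pos)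

-- ===== LEMMAS AND PROOFS =====

-- neighbours of a cell, and reachability inside a fixed cell set S₀
def pvNbrs (p : Int × Int) : List (Int × Int) :=
  pvDirections.map (fun d => (p.1 + d.1, p.2 + d.2))

def pvStep (S₀ : List (Int × Int)) (u v : Int × Int) : Prop := v ∈ S₀ ∧ v ∈ pvNbrs u

def pvReach (S₀ : List (Int × Int)) (a b : Int × Int) : Prop :=
  Relation.ReflTransGen (pvStep S₀) a b

theorem pvReach_closed {S₀ : List (Int × Int)} {P : Int × Int → Prop} {a b : Int × Int}
    (hP : ∀ u v, P u → pvStep S₀ u v → P v) (ha : P a) (h : pvReach S₀ a b) : P b := by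
  induction h with
  | refl => exact ha
  | tail _ hs ih => exact hP _ _ ih hs

theorem pvFilterEq {α : Type} [DecidableEq α] {s l : List α} (hs : s.Sublist l) (hl : l.Nodup) :
    l.filter (fun b => decide (b ∈ s)) = s := by
  induction hs with
  | slnil => simp
  | cons a h ih =>
    rename_i l₁ l₂
    have ha : a ∉ l₁ := fun hm => (List.nodup_cons.mp hl).1 (h.subset hm)
    simpa [ha] using ih (List.nodup_cons.mp hl).2
  | cons₂ a h ih =>
    rename_i l₁ l₂
    have hl2 := List.nodup_cons.mp hl
    have key : l₂.filter (fun b => decide (b ∈ a :: l₁)) = l₂.filter (fun b => decide (b ∈ l₁)) := by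
      apply List.filter_congr
      intro b hb
      have hba : b ≠ a := fun e => hl2.1 (e ▸ hb)
      simp [hba]
    simp only [List.filter_cons, List.mem_cons, decide_eq_true_eq]
    rw [if_pos (Or.inl trivial)]
    congr 1
    have := key
    simp only [List.mem_cons] at this
    rw [this]
    exact ih hl2.2

-- a sublist of a nodup list is determined by its membership
theorem pvSublistExt {α : Type} [DecidableEq α] {s t l : List α} (hs : s.Sublist l)
    (ht : t.Sublist l) (hl : l.Nodup) (h : ∀ b, b ∈ s ↔ b ∈ t) : s = t := by
  rw [← pvFilterEq hs hl, ← pvFilterEq ht hl]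
  exact List.filter_congr (fun b _ => by simp [h b])

-- the DFS stack loop removes exactly the reachable cells
theorem flood_spec (S₀ : List (Int × Int)) (hnd : S₀.Nodup) (a : Int × Int) (ha0 : a ∈ S₀) :
    ∀ (S stack : List (Int × Int)) (size : Int),
      S.Sublist S₀ →
      (∀ q ∈ stack, pvReach S₀ a q) →
      (∀ v ∈ S₀, v ∉ S → ∀ b ∈ pvNbrs v, b ∈ S → b ∈ stack) →
      (a ∈ S → a ∈ stack) →
      ((flood_fill_loop S stack size).1.Sublist S ∧
       (∀ b, b ∈ (flood_fill_loop S stack size).1 ↔ b ∈ S ∧ ¬ pvReach S₀ a b) ∧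
       (flood_fill_loop S stack size).2 =
         size + ((S.length : Int) - ((flood_fill_loop S stack size).1.length : Int))) := by
  intro S stack size
  induction S, stack, size using flood_fill_loop.induct with
  | case1 S size =>
    intro hSub hstack hclosed ha
    refine ⟨by simp [flood_fill_loop], ?_, by simp [flood_fill_loop]⟩
    intro b
    simp only [flood_fill_loop]
    constructor
    · intro hb
      refine ⟨hb, fun hr => ?_⟩
      have hb2 : b ∈ S₀ ∧ b ∉ S := by
        refine pvReach_closed (P := fun v => v ∈ S₀ ∧ v ∉ S) ?_ ⟨ha0, fun h => by simpa using ha h⟩ hr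
        intro u v hu hsv
        refine ⟨hsv.1, fun hvS => ?_⟩
        simpa using hclosed u hu.1 hu.2 v hsv.2 hvS
      exact hb2.2 hb
    · exact fun h => h.1
  | case2 S size p rest hp S' pushed ih =>
    intro hSub hstack hclosed ha
    have hndS : S.Nodup := hSub.nodup hnd
    have hS'sub : S'.Sublist S := List.filter_sublist
    have hpS' : p ∉ S' := by simp [S', PySem.Set.discard]
    have hmemS' : ∀ b, b ∈ S' ↔ b ∈ S ∧ b ≠ p := by
      intro b; simp [S', PySem.Set.discard, List.mem_filter]
    have hreachp : pvReach S₀ a p := hstack p (List.mem_cons_self ..)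
    have hmemPushed : ∀ q, q ∈ pushed ↔ q ∈ pvNbrs p ∧ q ∈ S' := by
      intro q; simp [pushed, List.mem_filter, pvNbrs]
    have hres := ih (hS'sub.trans hSub)
      (by
        intro q hq
        rcases List.mem_append.mp hq with hq | hq
        · rcases (hmemPushed q).mp hq with ⟨hn, hs⟩
          exact hreachp.tail ⟨(hS'sub.trans hSub).subset hs, hn⟩
        · exact hstack q (List.mem_cons_of_mem _ hq))
      (by
        intro v hv hvS' b hbn hbS'
        by_cases hvp : v = p
        · exact List.mem_append.mpr (Or.inl ((hmemPushed b).mpr ⟨hvp ▸ hbn, hbS'⟩))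
        · have hvS : v ∉ S := fun hvS => hvS' ((hmemS' v).mpr ⟨hvS, hvp⟩)
          have hb := hclosed v hv hvS b hbn (hS'sub.subset hbS')
          rcases List.mem_cons.mp hb with hb | hb
          · exact absurd (hb ▸ hbS') hpS'
          · exact List.mem_append.mpr (Or.inr hb))
      (by
        intro haS'
        rcases (hmemS' a).mp haS' with ⟨haS, hap⟩
        rcases List.mem_cons.mp (ha haS) with h | h
        · exact absurd h hap
        · exact List.mem_append.mpr (Or.inr h))
    have heq : flood_fill_loop S (p :: rest) size = flood_fill_loop S' (pushed ++ rest) (size + 1) := by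
      rw [flood_fill_loop, dif_pos hp]
    rw [heq]
    refine ⟨hres.1.trans hS'sub, ?_, ?_⟩
    · intro b
      rw [hres.2.1 b]
      constructor
      · rintro ⟨hbS', hnr⟩
        exact ⟨((hmemS' b).mp hbS').1, hnr⟩
      · rintro ⟨hbS, hnr⟩
        have hbp : b ≠ p := fun e => hnr (e ▸ hreachp)
        exact ⟨(hmemS' b).mpr ⟨hbS, hbp⟩, hnr⟩
    · have hlen : S'.length = S.length - 1 := by
        have : S' = S.erase p := by
          rw [hndS.erase_eq_filter]
          show S.filter (fun y => !(y == p)) = _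
          apply List.filter_congr
          intro b _
          simp [bne]
        rw [this, List.length_erase_of_mem hp]
      have hpos : 0 < S.length := List.length_pos_of_mem hp
      have hle : (flood_fill_loop S' (pushed ++ rest) (size + 1)).1.length ≤ S'.length :=
        hres.1.length_le
      rw [hres.2.2]
      omega
  | case3 S size p rest hp ih =>
    intro hSub hstack hclosed ha
    have heq : flood_fill_loop S (p :: rest) size = flood_fill_loop S rest size := by
      rw [flood_fill_loop, dif_neg hp]
    rw [heq]
    exact ih hSub (fun q hq => hstack q (List.mem_cons_of_mem _ hq))
      (fun v hv hvS b hbn hbS => by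
        rcases List.mem_cons.mp (hclosed v hv hvS b hbn hbS) with h | h
        · exact absurd (h ▸ hbS) hp
        · exact h)
      (fun haS => by
        rcases List.mem_cons.mp (ha haS) with h | h
        · exact absurd (h ▸ haS) hp
        · exact h)

-- the frontier-saturation loop collects exactly the reachable cells
theorem grow_spec (S₀ : List (Int × Int)) (hnd : S₀.Nodup) (a : Int × Int) (ha0 : a ∈ S₀) :
    ∀ (alive region frontier : List (Int × Int)),
      alive.Sublist S₀ →
      (∀ b, b ∈ region ↔ b ∈ S₀ ∧ b ∉ alive) →
      (∀ q ∈ frontier, q ∈ region) →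
      (∀ q ∈ region, pvReach S₀ a q) →
      (∀ v ∈ region, v ∉ frontier → ∀ b ∈ pvNbrs v, b ∉ alive) →
      region.Nodup →
      a ∈ region →
      ((grow_loop alive region frontier).1.Sublist alive ∧
       (∀ b, b ∈ (grow_loop alive region frontier).1 ↔ b ∈ alive ∧ ¬ pvReach S₀ a b) ∧
       (grow_loop alive region frontier).2.Nodup ∧
       (∀ b, b ∈ (grow_loop alive region frontier).2 ↔ b ∈ S₀ ∧ pvReach S₀ a b)) := by
  intro alive region frontier
  induction alive, region, frontier using grow_loop.induct with
  | case1 alive region =>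
    intro hSub hreg hfr hreach hint hnd' haR
    have heq : grow_loop alive region [] = (alive, region) := by
      rw [grow_loop, dif_pos rfl]
    rw [heq]
    have hregreach : ∀ b, b ∈ region ↔ b ∈ S₀ ∧ pvReach S₀ a b := by
      intro b
      constructor
      · exact fun hb => ⟨((hreg b).mp hb).1, hreach b hb⟩
      · rintro ⟨hbS, hr⟩
        refine pvReach_closed (P := fun v => v ∈ region) ?_ haR hr
        intro u v hu hsv
        have hva : v ∉ alive := hint u hu (by simp) v hsv.2
        exact (hreg v).mpr ⟨hsv.1, hva⟩
    refine ⟨List.Sublist.refl _, ?_, hnd', hregreach⟩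
    intro b
    constructor
    · intro hb
      refine ⟨hb, fun hr => ?_⟩
      have hbS : b ∈ S₀ := hSub.subset hb
      exact ((hreg b).mp ((hregreach b).mpr ⟨hbS, hr⟩)).2 hb
    · exact fun hb => hb.1
  | case2 alive region frontier h f' ih =>
    intro hSub hreg hfr hreach hint hnd' haR
    have hmemf' : ∀ b, b ∈ f' ↔ (∃ q ∈ frontier, b ∈ pvNbrs q) ∧ b ∈ alive := by
      intro b
      simp [f', pvFrontierNext, PySem.Set.mem_inter, PySem.Set.mem_ofList,
        List.mem_flatMap, pvNbrs]
    have hmemAlive' : ∀ b, b ∈ PySem.Set.diff alive f' ↔ b ∈ alive ∧ b ∉ f' :=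
      fun b => PySem.Set.mem_diff _ _ _
    have hmemRegion' : ∀ b, b ∈ PySem.Set.union region f' ↔ b ∈ region ∨ b ∈ f' :=
      fun b => PySem.Set.mem_union _ _ _
    have hf'alive : ∀ b, b ∈ f' → b ∈ alive := fun b hb => ((hmemf' b).mp hb).2
    have hSub' : (PySem.Set.diff alive f').Sublist S₀ :=
      List.Sublist.trans List.filter_sublist hSub
    have hreg' : ∀ b, b ∈ PySem.Set.union region f' ↔ b ∈ S₀ ∧ b ∉ PySem.Set.diff alive f' := by
      intro b
      rw [hmemRegion' b, hmemAlive' b]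
      constructor
      · rintro (hb | hb)
        · rcases (hreg b).mp hb with ⟨hbS, hba⟩
          exact ⟨hbS, fun hc => hba hc.1⟩
        · exact ⟨hSub.subset (hf'alive b hb), fun hc => hc.2 hb⟩
      · rintro ⟨hbS, hb⟩
        by_cases hba : b ∈ alive
        · right
          by_contra hbf
          exact hb ⟨hba, hbf⟩
        · exact Or.inl ((hreg b).mpr ⟨hbS, hba⟩)
    have hreach' : ∀ q ∈ PySem.Set.union region f', pvReach S₀ a q := by
      intro q hq
      rcases (hmemRegion' q).mp hq with hq | hq
      · exact hreach q hq
      · rcases (hmemf' q).mp hq with ⟨⟨v, hv, hqn⟩, hqa⟩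
        exact (hreach v (hfr v hv)).tail ⟨hSub.subset hqa, hqn⟩
    have hint' : ∀ v ∈ PySem.Set.union region f', v ∉ f' →
        ∀ b ∈ pvNbrs v, b ∉ PySem.Set.diff alive f' := by
      intro v hv hvf b hbn hbd
      rcases (hmemAlive' b).mp hbd with ⟨hba, hbf⟩
      rcases (hmemRegion' v).mp hv with hv | hv
      · by_cases hvfr : v ∈ frontier
        · exact hbf ((hmemf' b).mpr ⟨⟨v, hvfr, hbn⟩, hba⟩)
        · exact hint v hv hvfr b hbn hba
      · exact hvf hv
    have hnd'' : (PySem.Set.union region f').Nodup := PySem.Set.nodup_union _ _ hnd'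
    have hfr' : ∀ q ∈ f', q ∈ PySem.Set.union region f' :=
      fun q hq => (hmemRegion' q).mpr (Or.inr hq)
    have haR' : a ∈ PySem.Set.union region f' := (hmemRegion' a).mpr (Or.inl haR)
    have hres := ih hSub' hreg' hfr' hreach' hint' hnd'' haR'
    have heq : grow_loop alive region frontier =
        grow_loop (PySem.Set.diff alive f') (PySem.Set.union region f') f' := by
      rw [grow_loop, dif_neg h]
    rw [heq]
    refine ⟨hres.1.trans List.filter_sublist, ?_, hres.2.2.1, hres.2.2.2⟩
    intro b
    rw [hres.2.1 b]
    constructor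
    · rintro ⟨hb, hnr⟩
      exact ⟨((hmemAlive' b).mp hb).1, hnr⟩
    · rintro ⟨hb, hnr⟩
      refine ⟨(hmemAlive' b).mpr ⟨hb, fun hbf => ?_⟩, hnr⟩
      exact hnr (hreach' b ((hmemRegion' b).mpr (Or.inr hbf)))

-- one component-extraction step of A agrees with one step of B
theorem step_agree (S : List (Int × Int)) (hnd : S.Nodup) (a : Int × Int) (ha : a ∈ S) :
    (flood_fill_loop S [a] 0).1 = (grow_loop (PySem.Set.discard S a) [a] [a]).1 ∧
    (flood_fill_loop S [a] 0).2 = PySem.Set.len (grow_loop (PySem.Set.discard S a) [a] [a]).2 ∧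
    (grow_loop (PySem.Set.discard S a) [a] [a]).1.Sublist S := by
  have hmem0 : ∀ b, b ∈ PySem.Set.discard S a ↔ b ∈ S ∧ b ≠ a :=
    fun b => PySem.Set.mem_discard _ _ _
  have hA := flood_spec S hnd a ha S [a] 0 (List.Sublist.refl _)
    (by intro q hq; simp at hq; subst hq; exact Relation.ReflTransGen.refl)
    (fun v hv hvS => (hvS hv).elim)
    (fun _ => by simp)
  have hB := grow_spec S hnd a ha (PySem.Set.discard S a) [a] [a]
    List.filter_sublist
    (by
      intro b
      simp only [List.mem_singleton]
      constructor
      · intro hba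
        rw [hba]
        exact ⟨ha, fun hc => ((hmem0 a).mp hc).2 rfl⟩
      · rintro ⟨hbS, hb⟩
        by_contra hba
        exact hb ((hmem0 b).mpr ⟨hbS, hba⟩))
    (fun q hq => hq)
    (by intro q hq; simp at hq; subst hq; exact Relation.ReflTransGen.refl)
    (fun v hv hvf => (hvf hv).elim)
    (by simp)
    (by simp)
  have hBsub : (grow_loop (PySem.Set.discard S a) [a] [a]).1.Sublist S :=
    hB.1.trans List.filter_sublist
  have hAsub : (flood_fill_loop S [a] 0).1.Sublist S := hA.1
  have heq1 : (flood_fill_loop S [a] 0).1 = (grow_loop (PySem.Set.discard S a) [a] [a]).1 := by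
    apply pvSublistExt hAsub hBsub hnd
    intro b
    rw [hA.2.1 b, hB.2.1 b]
    constructor
    · rintro ⟨hbS, hnr⟩
      exact ⟨(hmem0 b).mpr ⟨hbS, fun e => hnr (e ▸ Relation.ReflTransGen.refl)⟩, hnr⟩
    · rintro ⟨hb0, hnr⟩
      exact ⟨((hmem0 b).mp hb0).1, hnr⟩
  refine ⟨heq1, ?_, hBsub⟩
  have hperm : ((flood_fill_loop S [a] 0).1 ++ (grow_loop (PySem.Set.discard S a) [a] [a]).2).Perm S := by
    rw [List.perm_ext_iff_of_nodup ?_ hnd]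
    · intro b
      rw [List.mem_append, hA.2.1 b, hB.2.2.2 b]
      constructor
      · rintro (⟨hb, _⟩ | ⟨hb, _⟩) <;> exact hb
      · intro hb
        by_cases hr : pvReach S a b
        · exact Or.inr ⟨hb, hr⟩
        · exact Or.inl ⟨hb, hr⟩
    · refine (hAsub.nodup hnd).append hB.2.2.1 ?_
      intro b hb1 hb2
      exact ((hA.2.1 b).mp hb1).2 ((hB.2.2.2 b).mp hb2).2
  have hlen := hperm.length_eq
  rw [List.length_append] at hlen
  rw [hA.2.2]
  unfold PySem.Set.len
  omega

theorem fold_agree (L : List (Int × Int)) :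
    ∀ (c l : Int) (S : List (Int × Int)), S.Nodup →
      L.foldl (fun (st : Int × Int × PySem.Set (Int × Int)) p =>
          if p ∈ st.2.2 then
            let r := flood_fill_loop st.2.2 [p] 0
            (st.1 + 1, max st.2.1 r.2, r.1)
          else st) (c, l, S) =
      L.foldl (fun (st : Int × Int × PySem.Set (Int × Int)) cell =>
          if cell ∈ st.2.2 then
            let r := grow_loop (PySem.Set.discard st.2.2 cell) [cell] [cell]
            (st.1 + 1, max st.2.1 (PySem.Set.len r.2), r.1)
          else st) (c, l, S) := by
  induction L with
  | nil => intro c l S _; rfl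
  | cons p L ih =>
    intro c l S hnd
    simp only [List.foldl_cons]
    by_cases hp : p ∈ S
    · have hstep := step_agree S hnd p hp
      simp only [if_pos hp]
      rw [hstep.1, hstep.2.1]
      exact ih _ _ _ (hstep.2.2.nodup hnd)
    · simp only [if_neg hp]
      exact ih _ _ _ hnd

-- ===== VERDICT (by name: the statement is the Claim_ definition above) =====
theorem count_blobs_spec : Claim_equal_count_blobs := by
  intro pos _
  unfold Spec_count_blobs count_blobs count_blobs_alt
  exact congrArg (fun st : Int × Int × List (Int × Int) => (st.1, st.2.1))
    (fold_agree _ 0 0 _ (PySem.Set.nodup_ofList _))
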